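-- pv_equiv track=rewrite | github.com/ani03sha/Technical-Interview-Preparation | ProblemSolving/450DSA/Python/src/string/SplitBinaryString.py | countOfBalancedSubstrings
-- ===== SOURCE A (Python) =====
-- def countOfBalancedSubstrings(s):
--     # Count of ones and zeros in the string
--     zeroCount, oneCount = 0, 0
--     # Count of balanced substrings
--     count = 0
--     # Loop through the entire string
--     for c in s:
--         if c == '0':
--             zeroCount += 1
--         elif c == '1':
--             oneCount += 1
--         if zeroCount == oneCount:
--             count += 1
--     return count if zeroCount == oneCount else -1
-- ===== SOURCE B (Python) =====
-- def countOfBalancedSubstrings(s):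
--     # Greedy segmentation: repeatedly slice off the shortest balanced chunk;
--     # the answer is the number of chunks, or -1 if the trailing chunk never balances.
--     count = 0
--     i, n = 0, len(s)
--     while i < n:
--         bal = 0
--         j = i
--         while j < n:
--             c = s[j]
--             j += 1
--             if c == '0':
--                 bal += 1
--             elif c == '1':
--                 bal -= 1
--             if bal == 0:
--                 break
--         if bal != 0:
--             return -1
--         count += 1
--         i = j
--     return count
-- ===== Notes on version B (the rewrite author's own statement) =====
-- stated objective: alternative
-- what changed: Replaces the single-pass two-counter scan with greedy segmentation: repeatedly cut off the shortest balanced chunk with a nested scan and count the chunks, returning -1 if the final chunk never balances.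
import Mathlib
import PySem

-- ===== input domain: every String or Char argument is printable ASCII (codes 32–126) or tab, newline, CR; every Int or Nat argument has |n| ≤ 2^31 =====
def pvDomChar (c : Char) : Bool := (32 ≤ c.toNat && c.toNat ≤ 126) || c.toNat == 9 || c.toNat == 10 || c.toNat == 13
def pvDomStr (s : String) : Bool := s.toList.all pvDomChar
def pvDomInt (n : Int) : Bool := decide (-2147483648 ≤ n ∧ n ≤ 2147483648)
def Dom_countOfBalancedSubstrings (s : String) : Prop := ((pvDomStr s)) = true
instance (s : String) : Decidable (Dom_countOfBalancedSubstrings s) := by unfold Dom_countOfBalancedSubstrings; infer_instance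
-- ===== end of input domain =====

-- B counts the same splits by greedy segmentation (cut off the shortest balanced chunk, repeat) instead of a single-pass two-counter scan; alternative decomposition, same cost.

-- ===== PORT A =====
-- A's loop over the characters keeping (zeroCount, oneCount, count)
def pvLoopA : List Char → Int → Int → Int → Int × Int × Int
  | [], z, o, c => (z, o, c)
  | ch :: t, z, o, c =>
    let z' := if ch = '0' then z + 1 else z
    let o' := if ch = '0' then o else if ch = '1' then o + 1 else o
    let c' := if z' = o' then c + 1 else c
    pvLoopA t z' o' c'

def countOfBalancedSubstrings (s : String) : Int :=
  let r := pvLoopA s.toList 0 0 0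
  if r.1 = r.2.1 then r.2.2 else -1

-- ===== PORT B =====
-- per-char balance delta (Source B's if/elif on the scanned character)
def pvDelta (c : Char) : Int := if c = '0' then 1 else if c = '1' then -1 else 0

-- inner while of Source B: advance until the running balance hits 0, return the rest (none = end reached unbalanced)
def pvScan : List Char → Int → Option (List Char)
  | [], _ => none
  | c :: t, bal =>
    if bal + pvDelta c = 0 then some t else pvScan t (bal + pvDelta c)

theorem pvScan_lt : ∀ (l : List Char) (b : Int) (r : List Char),
    pvScan l b = some r → r.length < l.length := by
  intro l
  induction l with
  | nil => intro b r h; simp [pvScan] at h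
  | cons c t ih =>
    intro b r h
    simp only [pvScan] at h
    split at h
    · cases h; simp
    · have := ih _ _ h; simp; omega

-- outer while of Source B: count the chunks, -1 propagates when a chunk never balances
def pvSeg : List Char → Int
  | [] => 0
  | c :: t =>
    match h : pvScan (c :: t) 0 with
    | none => -1
    | some r =>
      let rest := pvSeg r
      if rest = -1 then -1 else 1 + rest
termination_by l => l.length
decreasing_by exact pvScan_lt _ _ _ h

def countOfBalancedSubstrings_alt (s : String) : Int := pvSeg s.toList

-- ===== PRECONDITION & SPEC =====
def Spec_countOfBalancedSubstrings (s : String) (out : Int) : Prop := out = countOfBalancedSubstrings_alt s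
instance (s : String) (out : Int) : Decidable (Spec_countOfBalancedSubstrings s out) := by unfold Spec_countOfBalancedSubstrings; infer_instance

-- ===== CLAIM (what is proved, stated in full; the proofs are below) =====
def Claim_equal_countOfBalancedSubstrings : Prop := ∀ (s : String), Dom_countOfBalancedSubstrings s → Spec_countOfBalancedSubstrings s (countOfBalancedSubstrings s)

-- ===== LEMMAS AND PROOFS =====

-- proof-side abstractions: total balance, count of balanced nonempty prefixes
def pvBal : List Char → Int
  | [] => 0
  | c :: t => pvDelta c + pvBal t

def pvZc : List Char → Int → Int
  | [], _ => 0
  | c :: t, b => (if b + pvDelta c = 0 then 1 else 0) + pvZc t (b + pvDelta c)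

theorem pvZc_nonneg : ∀ (l : List Char) (b : Int), 0 ≤ pvZc l b := by
  intro l
  induction l with
  | nil => intro b; simp [pvZc]
  | cons c t ih => intro b; simp only [pvZc]; have := ih (b + pvDelta c); split <;> omega

-- A's loop computes the balance and the balanced-prefix count
theorem pvLoopA_char : ∀ (l : List Char) (z o c : Int),
    (pvLoopA l z o c).1 - (pvLoopA l z o c).2.1 = z - o + pvBal l ∧
    (pvLoopA l z o c).2.2 = c + pvZc l (z - o) := by
  intro l
  induction l with
  | nil => intro z o c; simp [pvLoopA, pvBal, pvZc]
  | cons ch t ih =>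
    intro z o c
    simp only [pvLoopA, pvBal, pvZc]
    set z' := if ch = '0' then z + 1 else z with hz
    set o' := if ch = '0' then o else if ch = '1' then o + 1 else o with ho
    have hd : z' - o' = z - o + pvDelta ch := by
      simp only [hz, ho, pvDelta]; split_ifs <;> omega
    obtain ⟨ih1, ih2⟩ := ih z' o' (if z' = o' then c + 1 else c)
    refine ⟨by rw [ih1, hd]; ring, ?_⟩
    rw [ih2, hd]
    by_cases h : z - o + pvDelta ch = 0
    · have : z' = o' := by omega
      simp [h, this]; ring
    · have : ¬ z' = o' := by omega
      simp [h, this]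

-- if the scan fails, no nonempty prefix balances
theorem pvScan_none : ∀ (l : List Char) (b : Int),
    pvScan l b = none → pvZc l b = 0 := by
  intro l
  induction l with
  | nil => intro b _; simp [pvZc]
  | cons c t ih =>
    intro b h
    simp only [pvScan] at h
    split at h
    · exact absurd h (by simp)
    · rename_i hne
      simp only [pvZc]
      rw [if_neg hne, ih _ h]
      omega

-- a nonempty list with no balanced nonempty prefix has nonzero total balance
theorem pvZc_zero_bal : ∀ (l : List Char) (b : Int),
    l ≠ [] → pvZc l b = 0 → b + pvBal l ≠ 0 := by
  intro l
  induction l with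
  | nil => intro b h; exact absurd rfl h
  | cons c t ih =>
    intro b _ h
    simp only [pvZc] at h
    have hnn := pvZc_nonneg t (b + pvDelta c)
    have h1 : ¬ (b + pvDelta c = 0) := by
      intro h0; rw [if_pos h0] at h; omega
    rw [if_neg h1] at h
    cases t with
    | nil => simp [pvBal]; omega
    | cons d u =>
      have := ih (b + pvDelta c) (by simp) (by omega)
      simp only [pvBal] at this ⊢
      omega

-- if the scan succeeds, the consumed chunk balances and contributes exactly one split
theorem pvScan_some : ∀ (l : List Char) (b : Int) (r : List Char),
    pvScan l b = some r →
    b + pvBal l = pvBal r ∧ pvZc l b = 1 + pvZc r 0 := by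
  intro l
  induction l with
  | nil => intro b r h; simp [pvScan] at h
  | cons c t ih =>
    intro b r h
    simp only [pvScan] at h
    split at h
    · rename_i h0
      cases h
      constructor
      · simp only [pvBal]; omega
      · simp only [pvZc]
        rw [if_pos h0, h0]
    · rename_i hne
      obtain ⟨ih1, ih2⟩ := ih _ _ h
      constructor
      · simp only [pvBal] at ih1 ⊢; omega
      · simp only [pvZc] at ih2 ⊢
        rw [if_neg hne]
        omega

-- B's greedy segmentation computes the same if-expression
theorem pvSeg_eq (l : List Char) :
    pvSeg l = if pvBal l = 0 then pvZc l 0 else -1 := by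
  induction hl : l.length using Nat.strong_induction_on generalizing l with
  | _ n ih =>
    cases l with
    | nil => simp [pvSeg, pvBal, pvZc]
    | cons c t =>
      rw [pvSeg]
      cases hs : pvScan (c :: t) 0 with
      | none =>
        have hz := pvScan_none _ _ hs
        have hb := pvZc_zero_bal (c :: t) 0 (by simp) hz
        simp only [zero_add] at hb
        rw [if_neg hb]
      | some r =>
        obtain ⟨h1, h2⟩ := pvScan_some _ _ _ hs
        simp only [zero_add] at h1
        have hlt := pvScan_lt _ _ _ hs
        have ihr := ih r.length (by omega) r rfl
        simp only
        rw [ihr, h1, h2]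
        by_cases hb : pvBal r = 0
        · have := pvZc_nonneg r 0
          rw [if_pos hb, if_pos hb, if_neg (by omega : ¬ pvZc r 0 = -1)]
        · rw [if_neg hb, if_neg hb]; simp

-- ===== VERDICT (by name: the statement is the Claim_ definition above) =====
theorem countOfBalancedSubstrings_spec : Claim_equal_countOfBalancedSubstrings := by
  unfold Claim_equal_countOfBalancedSubstrings
  intro s _
  unfold Spec_countOfBalancedSubstrings countOfBalancedSubstrings countOfBalancedSubstrings_alt
  obtain ⟨h1, h2⟩ := pvLoopA_char s.toList 0 0 0
  rw [pvSeg_eq]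
  simp only [show (0:Int) - 0 = 0 by ring, zero_add] at h1 h2
  by_cases hb : pvBal s.toList = 0
  · have : (pvLoopA s.toList 0 0 0).1 = (pvLoopA s.toList 0 0 0).2.1 := by omega
    simp [this, hb, h2]
  · have : ¬ (pvLoopA s.toList 0 0 0).1 = (pvLoopA s.toList 0 0 0).2.1 := by omega
    simp [this, hb]
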